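-- pv_equiv track=rewrite | github.com/xsimurka/CTL_sat_degree | src/multivalued_grn.py | is_context_satisfied
-- ===== SOURCE A (Python) =====
-- from bisect import bisect_right
--
-- def is_context_satisfied(context_intervals, regulators, regulator_values):
--     """
--     Check whether a context's intervals are satisfied by the given regulator state.
--
--     @param context_intervals: List of indices of activity intervals (integers or "*").
--     @param regulators Mapping of regulators' names and corresponding activity thresholds
--     @param regulator_values: List of regulators' activity levels in current state.
--     @return: True if context is satisfied, False otherwise.
--     """
--     for i in range(len(context_intervals)):
--         if context_intervals[i] == '*':
--             continue
--         ci = int(context_intervals[i])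
--         thresholds = regulators[i].get("thresholds")
--         value = regulator_values[i]
--         # insert the value into activity intervals and compare with context value
--         if bisect_right(thresholds, value) + 1 != ci:
--             return False
--
--     return True
-- ===== SOURCE B (Python) =====
-- def is_context_satisfied(context_intervals, regulators, regulator_values):
--     """Idiomatic rewrite: zip + all with a linear rank count instead of an
--     index loop with bisect_right."""
--     return all(
--         c == '*'
--         or sum(1 for t in r["thresholds"] if t <= v) + 1 == int(c)
--         for c, r, v in zip(context_intervals, regulators, regulator_values)
--     )
-- ===== Notes on version B (the rewrite author's own statement) =====
-- stated objective: idiomatic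
-- what changed: The index loop with an early return and a bisect_right binary search is replaced by a single zip/all expression whose rank is a linear count of thresholds <= value, removing the bisect import and explicit indexing.
-- outside the precondition, e.g. on is_context_satisfied(['2'], [{'thresholds': [5, 1]}], [3]): A returns False, B returns True; on is_context_satisfied(['9', 'x'], [{'thresholds': [0]}], [0]): A returns False, B returns False
import Mathlib
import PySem

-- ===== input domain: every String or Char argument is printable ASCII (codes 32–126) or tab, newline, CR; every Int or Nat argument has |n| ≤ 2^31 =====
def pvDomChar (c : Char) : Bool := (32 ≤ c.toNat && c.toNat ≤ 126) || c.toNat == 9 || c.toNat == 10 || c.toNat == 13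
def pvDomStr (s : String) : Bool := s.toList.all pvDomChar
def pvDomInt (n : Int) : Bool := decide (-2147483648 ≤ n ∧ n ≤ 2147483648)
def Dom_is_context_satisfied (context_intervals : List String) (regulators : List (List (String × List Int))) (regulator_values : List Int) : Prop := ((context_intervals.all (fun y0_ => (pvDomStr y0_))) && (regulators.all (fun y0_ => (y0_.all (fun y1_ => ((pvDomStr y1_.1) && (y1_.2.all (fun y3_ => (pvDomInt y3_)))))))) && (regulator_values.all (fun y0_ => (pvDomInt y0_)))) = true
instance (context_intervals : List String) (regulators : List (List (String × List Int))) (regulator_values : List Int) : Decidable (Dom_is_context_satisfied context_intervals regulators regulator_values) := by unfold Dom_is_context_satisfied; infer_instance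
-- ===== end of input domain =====

-- B replaces A's index loop + bisect_right probe by an idiomatic zip/all with a linear rank
-- count; equivalence is about the return value only (neither version mutates its arguments).

-- ===== PORT A =====
-- the 'for i in range(len(context_intervals))' loop with its early 'return False'
def pvAloop (context_intervals : List String) (regulators : List (List (String × List Int))) (regulator_values : List Int) : List Nat → Bool
  | [] => true
  | i :: rest =>
    if context_intervals.getD i "" == "*" then pvAloop context_intervals regulators regulator_values rest
    else
      let ci := (PySem.Int.ofStr? (context_intervals.getD i "")).getD 0
      let thresholds := (PySem.Dict.mk (regulators.getD i [])).get? "thresholds"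
      let value := regulator_values.getD i 0
      if ((PySem.List.bisectRight (thresholds.getD []) value : Int) + 1) ≠ ci then false
      else pvAloop context_intervals regulators regulator_values rest

def is_context_satisfied (context_intervals : List String) (regulators : List (List (String × List Int))) (regulator_values : List Int) : Bool :=
  pvAloop context_intervals regulators regulator_values (List.range context_intervals.length)

-- ===== PORT B =====
def is_context_satisfied_alt (context_intervals : List String) (regulators : List (List (String × List Int))) (regulator_values : List Int) : Bool :=
  (context_intervals.zip (regulators.zip regulator_values)).all (fun p =>
    p.1 == "*" ||
      (((((PySem.Dict.mk p.2.1).get? "thresholds").getD []).countP (fun t => decide (t ≤ p.2.2)) : Int) + 1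
        == (PySem.Int.ofStr? p.1).getD 0))

-- ===== PRECONDITION & SPEC =====
-- Pre_ excludes the inputs where A raises (a non-'*' context entry that is not an int literal,
-- an index past regulators/regulator_values, a regulator without a "thresholds" key) and, because
-- it is a closed-form condition, it checks EVERY non-'*' position even if A's early 'return False'
-- would never reach a malformed later one; it also requires each consulted thresholds list to be
-- sorted ascending (bisect_right's documented precondition) — on an unsorted list A's binary-search
-- rank is an accident of probing order and B's linear rank is equally defensible.
def Pre_is_context_satisfied (context_intervals : List String) (regulators : List (List (String × List Int))) (regulator_values : List Int) : Prop :=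
  ∀ i : Nat, i < context_intervals.length → context_intervals.getD i "" ≠ "*" →
    (PySem.Int.ofStr? (context_intervals.getD i "")).isSome = true ∧
    i < regulators.length ∧ i < regulator_values.length ∧
    ((PySem.Dict.mk (regulators.getD i [])).get? "thresholds").isSome = true ∧
    (((PySem.Dict.mk (regulators.getD i [])).get? "thresholds").getD []).Pairwise (· ≤ ·)

instance (context_intervals : List String) (regulators : List (List (String × List Int))) (regulator_values : List Int) : Decidable (Pre_is_context_satisfied context_intervals regulators regulator_values) := by unfold Pre_is_context_satisfied; infer_instance

def pvWitness_is_context_satisfied : List String × (List (List (String × List Int))) × List Int :=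
  (["1", "*"], [[("thresholds", [2, 5])]], [0])

def Spec_is_context_satisfied (context_intervals : List String) (regulators : List (List (String × List Int))) (regulator_values : List Int) (out : Bool) : Prop := out = is_context_satisfied_alt context_intervals regulators regulator_values
instance (context_intervals : List String) (regulators : List (List (String × List Int))) (regulator_values : List Int) (out : Bool) : Decidable (Spec_is_context_satisfied context_intervals regulators regulator_values out) := by unfold Spec_is_context_satisfied; infer_instance

-- ===== CLAIM (what is proved, stated in full; the proofs are below) =====
def Claim_equal_is_context_satisfied : Prop := ∀ (context_intervals : List String) (regulators : List (List (String × List Int))) (regulator_values : List Int), Dom_is_context_satisfied context_intervals regulators regulator_values → Pre_is_context_satisfied context_intervals regulators regulator_values → Spec_is_context_satisfied context_intervals regulators regulator_values (is_context_satisfied context_intervals regulators regulator_values)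

-- ===== LEMMAS AND PROOFS =====

-- the per-index test of A's loop body
def pvCheckA (context_intervals : List String) (regulators : List (List (String × List Int))) (regulator_values : List Int) (i : Nat) : Bool :=
  if context_intervals.getD i "" == "*" then true
  else !(decide (((PySem.List.bisectRight (((PySem.Dict.mk (regulators.getD i [])).get? "thresholds").getD []) (regulator_values.getD i 0) : Int) + 1) ≠ (PySem.Int.ofStr? (context_intervals.getD i "")).getD 0))

-- the per-index test of B, read off at index i with default values
def pvCheckB (context_intervals : List String) (regulators : List (List (String × List Int))) (regulator_values : List Int) (i : Nat) : Bool :=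
  (context_intervals.getD i "" == "*") ||
    (((((PySem.Dict.mk (regulators.getD i [])).get? "thresholds").getD []).countP (fun t => decide (t ≤ regulator_values.getD i 0)) : Int) + 1
      == (PySem.Int.ofStr? (context_intervals.getD i "")).getD 0)

theorem pvAloop_eq_all (cis : List String) (regs : List (List (String × List Int))) (vals : List Int) (l : List Nat) :
    pvAloop cis regs vals l = l.all (pvCheckA cis regs vals) := by
  induction l with
  | nil => rfl
  | cons i rest ih =>
    simp only [pvAloop, pvCheckA, List.all_cons]
    split_ifs with h1 h2
    · exact ih
    · rw [decide_eq_true h2]; simp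
    · rw [decide_eq_false h2]; simp [ih]

theorem pv_countP_split (xs : List Int) (p : Int → Bool) (k : Nat) (hk : k ≤ xs.length)
    (h1 : ∀ (j : Nat) (hj : j < xs.length), j < k → p xs[j] = true)
    (h2 : ∀ (j : Nat) (hj : j < xs.length), k ≤ j → p xs[j] = false) :
    xs.countP p = k := by
  conv_lhs => rw [← List.take_append_drop k xs]
  rw [List.countP_append]
  have t1 : (xs.take k).countP p = k := by
    rw [List.countP_eq_length.mpr, List.length_take, Nat.min_eq_left hk]
    intro a ha
    obtain ⟨j, hj, rfl⟩ := List.mem_iff_getElem.mp ha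
    have hjk : j < k := by simp at hj; omega
    have hjx : j < xs.length := by simp at hj; omega
    rw [List.getElem_take]
    exact h1 j hjx hjk
  have t2 : (xs.drop k).countP p = 0 := by
    rw [List.countP_eq_zero]
    intro a ha
    obtain ⟨j, hj, rfl⟩ := List.mem_iff_getElem.mp ha
    have hj' : k + j < xs.length := by simp at hj; omega
    have hx := h2 (k + j) hj' (by omega)
    simpa [List.getElem_drop] using hx
  omega

theorem pv_bisect_eq_countP (xs : List Int) (x : Int) (h : xs.Pairwise (· ≤ ·)) :
    PySem.List.bisectRight xs x = xs.countP (fun t => decide (t ≤ x)) := by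
  obtain ⟨hle, hlt, hgt⟩ := PySem.List.bisectRight_spec xs x h
  symm
  refine pv_countP_split xs _ _ hle (fun j hj hjk => by simpa using hlt j hj hjk)
    (fun j hj hjk => by have := hgt j hj hjk; simp; omega)

-- for an index whose thresholds list is sorted, A's test and B's test agree
theorem pvCheck_eq (cis : List String) (regs : List (List (String × List Int))) (vals : List Int)
    (i : Nat)
    (hs : (((PySem.Dict.mk (regs.getD i [])).get? "thresholds").getD []).Pairwise (· ≤ ·)) :
    pvCheckA cis regs vals i = pvCheckB cis regs vals i := by
  simp only [pvCheckA, pvCheckB]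
  by_cases h1 : cis.getD i "" = "*"
  · rw [h1]; simp
  · have h1' : (cis.getD i "" == "*") = false := by simpa using h1
    rw [h1', pv_bisect_eq_countP _ _ hs]
    simp only [Bool.false_or, ne_eq, decide_not, Bool.not_not]
    rw [Bool.eq_iff_iff]
    simp

-- ===== VERDICT =====
theorem is_context_satisfied_spec : Claim_equal_is_context_satisfied := by
  intro cis regs vals _hDom hPre
  unfold Spec_is_context_satisfied
  rw [is_context_satisfied, pvAloop_eq_all]
  rw [Bool.eq_iff_iff]
  simp only [is_context_satisfied_alt, List.all_eq_true, List.mem_range]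
  constructor
  · -- every index passes A's test → every zipped triple passes B's test
    intro hA p hp
    obtain ⟨j, hj, rfl⟩ := List.mem_iff_getElem.mp hp
    have hj1 : j < cis.length := by simp at hj; omega
    have hj2 : j < regs.length := by simp at hj; omega
    have hj3 : j < vals.length := by simp at hj; omega
    by_cases hstar : cis.getD j "" = "*"
    · have hst : cis[j] = "*" := by rwa [List.getD_eq_getElem _ _ hj1] at hstar
      simp [List.getElem_zip, hst]
    · have hsort := (hPre j hj1 hstar).2.2.2.2
      have hAj := hA j hj1
      rw [pvCheck_eq cis regs vals j hsort] at hAj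
      simp only [pvCheckB, List.getD_eq_getElem _ _ hj1, List.getD_eq_getElem _ _ hj2,
        List.getD_eq_getElem _ _ hj3] at hAj
      simpa [List.getElem_zip] using hAj
  · -- every zipped triple passes B's test → every index passes A's test
    intro hB i hi
    by_cases hstar : cis.getD i "" = "*"
    · have hstar' : cis[i]?.getD "" = "*" := by
        simpa [List.getD_eq_getElem?_getD] using hstar
      simp [pvCheckA, hstar']
    · obtain ⟨hparse, hr, hv, hkey, hsort⟩ := hPre i hi hstar
      rw [pvCheck_eq cis regs vals i hsort]
      have hlen : i < (cis.zip (regs.zip vals)).length := by simp; omega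
      have hBi := hB ((cis.zip (regs.zip vals))[i]) (List.getElem_mem hlen)
      simp only [pvCheckB, List.getD_eq_getElem _ _ hi, List.getD_eq_getElem _ _ hr,
        List.getD_eq_getElem _ _ hv]
      simpa [List.getElem_zip] using hBi
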